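-- pv_equiv track=rewrite | github.com/kimzeze/Programmers-python | 프로그래머스/1/140108. 문자열 나누기/문자열 나누기.py | solution
-- ===== SOURCE A (Python) =====
-- def solution(s):
--     ans = 0
--     # 문자열 인덱스
--     index = 0
--     # 문자열의 길이
--     length = len(s)
--
--     while index < length:
--         # 현재 인덱스의 문자를 x로 설정
--         x = s[index]
--
--         # x의 개수와 x가 아닌 문자의 개수
--         x_count = 0
--         not_x_count = 0
--
--         for i in range(index, length):
--             # 현재 문자가 x인 경우 x_count 증가
--             if s[i] == x:
--                 x_count += 1
--             # 현재 문자가 x가 아닌 경우 not_x_count 증가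
--             else:
--                 not_x_count += 1
--
--             # x의 개수와 x가 아닌 문자의 개수가 같아지면
--             if x_count == not_x_count:
--                 # 분해된 문자열의 개수 증가
--                 ans += 1
--                 # 다음 인덱스로 이동
--                 index = i + 1
--                 # 반복문 종료
--                 break
--
--         # 끝까지 개수가 다른 경우
--         if x_count != not_x_count:
--             # 분해된 문자열의 개수 증가
--             ans += 1
--             break
--
--     return ans
-- ===== SOURCE B (Python) =====
-- def solution(s):
--     answer = 0
--     same = 0
--     diff = 0
--     first = ""
--     for c in s:
--         if same == diff:
--             answer += 1
--             first = c
--         if c == first: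
--             same += 1
--         else:
--             diff += 1
--     return answer
-- ===== Notes on version B (the rewrite author's own statement) =====
-- stated objective: simpler
-- what changed: Replaces A's outer while + inner for (re-scanning from each segment start with per-segment counters) by a single linear pass that keeps running same/diff counters and starts a new segment whenever they are equal.
import Mathlib
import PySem

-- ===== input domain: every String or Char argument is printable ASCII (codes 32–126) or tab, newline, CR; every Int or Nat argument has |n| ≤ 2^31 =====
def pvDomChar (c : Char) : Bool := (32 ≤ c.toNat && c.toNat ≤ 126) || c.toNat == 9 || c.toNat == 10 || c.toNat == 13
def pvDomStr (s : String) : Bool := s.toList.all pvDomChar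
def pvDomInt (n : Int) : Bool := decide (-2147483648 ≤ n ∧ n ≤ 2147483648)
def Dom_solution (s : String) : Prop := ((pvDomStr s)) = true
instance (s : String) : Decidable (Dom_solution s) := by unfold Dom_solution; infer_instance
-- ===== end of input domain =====

-- B replaces A's outer-while/inner-for segment scan with one linear pass keeping
-- running `same`/`diff` counters (simpler decomposition, same result).

-- ===== PORT A =====
-- A's inner for-loop over range(index, length): scans the suffix keeping x_count /
-- not_x_count, breaking (returning .inr with the remaining suffix, i.e. index = i+1)
-- when the counts become equal, else returning the final counts (.inl).
def scanA (x : Char) : List Char → Int → Int → (Int × Int) ⊕ (List Char)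
  | [], xc, nc => .inl (xc, nc)
  | c :: rest, xc, nc =>
    if c = x then
      if xc + 1 = nc then .inr rest else scanA x rest (xc + 1) nc
    else
      if xc = nc + 1 then .inr rest else scanA x rest xc (nc + 1)

-- needed by loopA's termination (the break advances index past at least one char)
theorem scanA_inr_length {x : Char} : ∀ {ys : List Char} {s d : Int} {rest : List Char},
    scanA x ys s d = .inr rest → rest.length < ys.length := by
  intro ys
  induction ys with
  | nil => intro s d rest h; simp [scanA] at h
  | cons c cs ih =>
    intro s d rest h
    simp only [scanA] at h
    split at h
    · split at h
      · cases h; simp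
      · exact Nat.lt_trans (ih h) (Nat.lt_succ_self _)
    · split at h
      · cases h; simp
      · exact Nat.lt_trans (ih h) (Nat.lt_succ_self _)

-- A's outer while: x = s[index]; run the inner scan; on break continue after it,
-- otherwise do the final x_count != not_x_count check and stop.
def loopA : List Char → Int → Int
  | [], ans => ans
  | c :: cs, ans =>
    match h : scanA c (c :: cs) 0 0 with
    | .inl (xc, nc) => if xc ≠ nc then ans + 1 else ans
    | .inr rest => loopA rest (ans + 1)
termination_by xs _ => xs.length
decreasing_by exact scanA_inr_length h

def solution (s : String) : Int := loopA s.toList 0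

-- ===== PORT B =====
-- one pass; `first`'s initial value is never read (Python's "" placeholder) since
-- same = diff already holds at the first character.
def loopB : List Char → Char → Int → Int → Int → Int
  | [], _, _, _, ans => ans
  | c :: rest, first, same, diff, ans =>
    let first' := if same = diff then c else first
    let ans' := if same = diff then ans + 1 else ans
    if c = first' then loopB rest first' (same + 1) diff ans'
    else loopB rest first' same (diff + 1) ans'

def solution_alt (s : String) : Int := loopB s.toList ' ' 0 0 0

-- ===== PRECONDITION & SPEC =====
def Spec_solution (s : String) (out : Int) : Prop := out = solution_alt s
instance (s : String) (out : Int) : Decidable (Spec_solution s out) := by unfold Spec_solution; infer_instance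

-- ===== CLAIM (what is proved, stated in full; the proofs are below) =====
def Claim_equal_solution : Prop := ∀ (s : String), Dom_solution s → Spec_solution s (solution s)

-- ===== LEMMAS AND PROOFS =====

-- only the difference same - diff matters to loopB
theorem loopB_shift : ∀ (xs : List Char) (f : Char) (s d a k : Int),
    loopB xs f (s + k) (d + k) a = loopB xs f s d a := by
  intro xs
  induction xs with
  | nil => intro f s d a k; simp [loopB]
  | cons c rest ih =>
    intro f s d a k
    simp only [loopB]
    by_cases hsd : s = d
    · have h2 : s + k = d + k := by omega
      simp only [if_pos h2, if_pos hsd]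
      rw [show s + k + 1 = (s + 1) + k by ring]
      exact ih c (s + 1) d (a + 1) k
    · have h2 : s + k ≠ d + k := by omega
      simp only [if_neg h2, if_neg hsd]
      by_cases hc : c = f
      · simp only [if_pos hc]
        rw [show s + k + 1 = (s + 1) + k by ring]
        exact ih f (s + 1) d a k
      · simp only [if_neg hc]
        rw [show d + k + 1 = (d + 1) + k by ring]
        exact ih f s (d + 1) a k

-- a scan that starts off-balance and runs out ends off-balance
theorem scanA_inl_ne {x : Char} : ∀ {ys : List Char} {s d xc nc : Int},
    scanA x ys s d = .inl (xc, nc) → s ≠ d → xc ≠ nc := by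
  intro ys
  induction ys with
  | nil =>
    intro s d xc nc h hne
    simp only [scanA, Sum.inl.injEq, Prod.mk.injEq] at h
    omega
  | cons c cs ih =>
    intro s d xc nc h hne
    simp only [scanA] at h
    split at h
    · split at h
      · simp at h
      · next hb => exact ih h hb
    · split at h
      · simp at h
      · next hb => exact ih h hb

-- inside a segment (counters unbalanced, first = x) B follows A's inner scan exactly
theorem bridge {x : Char} : ∀ (ys : List Char) (s d a : Int), s ≠ d →
    loopB ys x s d a =
      (match scanA x ys s d with
       | .inl _ => a
       | .inr rest => loopB rest x 0 0 a) := by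
  intro ys
  induction ys with
  | nil => intro s d a h; simp [loopB, scanA]
  | cons c cs ih =>
    intro s d a h
    simp only [loopB, scanA, if_neg h]
    by_cases hc : c = x
    · simp only [if_pos hc]
      by_cases hb : s + 1 = d
      · simp only [if_pos hb]
        show loopB cs x (s + 1) d a = loopB cs x 0 0 a
        rw [hb]
        have := loopB_shift cs x 0 0 a d
        simpa using this
      · simp only [if_neg hb]
        exact ih (s + 1) d a hb
    · simp only [if_neg hc]
      by_cases hb : s = d + 1
      · simp only [if_pos hb]
        show loopB cs x s (d + 1) a = loopB cs x 0 0 a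
        rw [hb]
        have := loopB_shift cs x 0 0 a (d + 1)
        simpa using this
      · simp only [if_neg hb]
        exact ih s (d + 1) a hb

theorem main_lemma : ∀ (n : Nat) (xs : List Char), xs.length ≤ n →
    ∀ (f : Char) (a : Int), loopA xs a = loopB xs f 0 0 a := by
  intro n
  induction n with
  | zero =>
    intro xs hlen f a
    have : xs = [] := List.eq_nil_of_length_eq_zero (Nat.le_zero.mp hlen)
    subst this; simp [loopA, loopB]
  | succ n ih =>
    intro xs hlen f a
    match xs with
    | [] => simp [loopA, loopB]
    | c :: cs =>
      have h10 : (1 : Int) ≠ 0 := one_ne_zero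
      have hB : loopB (c :: cs) f 0 0 a = loopB cs c 1 0 (a + 1) := by
        simp [loopB]
      rw [hB, bridge cs 1 0 (a + 1) h10]
      rw [loopA]
      have hscan : scanA c (c :: cs) 0 0 = scanA c cs 1 0 := by
        simp [scanA]
      split
      · next xc nc hinl =>
        rw [hscan] at hinl
        have hne := scanA_inl_ne hinl h10
        rw [hinl]
        simp [hne]
      · next rest hinr =>
        rw [hscan] at hinr
        rw [hinr]
        have hlt : rest.length < cs.length := scanA_inr_length hinr
        exact ih rest (by simp at hlen; omega) c (a + 1)

-- ===== VERDICT (by name: the statement is the Claim_ definition above) =====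
theorem solution_spec : Claim_equal_solution := by
  intro s _
  unfold Spec_solution solution solution_alt
  exact main_lemma s.toList.length s.toList le_rfl ' ' 0
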